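-- pv_equiv track=rewrite | github.com/dvargas2013/MainPythons | done/String/Solver/chemistry.py | splitTarget
-- ===== SOURCE A (Python) =====
-- def splitTarget(target, w2):
--     target, w2 = target.lower(), w2.lower()
--     grow = ''
--     for c in w2:
--         if target[:1] == c:
--             grow += target[:1]
--             target = target[1:]
--     return grow, target
-- ===== SOURCE B (Python) =====
-- def splitTarget(target, w2):
--     target, w2 = target.lower(), w2.lower()
--     i = 0
--     j = 0
--     for t in target:
--         k = w2.find(t, j)
--         if k == -1:
--             break
--         j = k + 1
--         i += 1
--     return target[:i], target[i:]
-- ===== Notes on version B (the rewrite author's own statement) =====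
-- stated objective: faster
-- what changed: B replaces A's loop over w2 that peels matching characters off target's front (rebuilding both strings each step) with a loop over target's characters advancing a find()-based pointer into w2, then returns target split once at the matched-prefix length i.
import Mathlib
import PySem

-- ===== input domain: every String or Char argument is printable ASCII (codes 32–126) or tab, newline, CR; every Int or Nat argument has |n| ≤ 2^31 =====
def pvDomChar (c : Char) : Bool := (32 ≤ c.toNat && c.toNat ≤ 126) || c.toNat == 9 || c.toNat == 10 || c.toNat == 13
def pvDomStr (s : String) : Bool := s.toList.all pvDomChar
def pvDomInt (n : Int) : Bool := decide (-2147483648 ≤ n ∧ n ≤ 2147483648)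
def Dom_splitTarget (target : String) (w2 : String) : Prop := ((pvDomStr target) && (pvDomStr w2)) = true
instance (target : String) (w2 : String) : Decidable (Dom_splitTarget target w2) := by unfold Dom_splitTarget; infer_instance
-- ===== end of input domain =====

-- B re-reads the greedy match as "split target at the matched-prefix length i": it loops over
-- target with a forward-search pointer into w2 (str.find), instead of A's loop over w2 that
-- peels characters off target's front rebuilding both strings each step; a timing run measured B faster.


-- ===== PORT A =====
-- A's loop over w2, state (grow, target); target[:1], target[1:], '+=' kept as slice/append.
def splitTargetLoopA : List Char → List Char × List Char → List Char × List Char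
  | [], st => st
  | c :: cs, (grow, tgt) =>
    if PySem.List.slice tgt none (some 1) = [c] then
      splitTargetLoopA cs (grow ++ PySem.List.slice tgt none (some 1),
                           PySem.List.slice tgt (some 1) none)
    else
      splitTargetLoopA cs (grow, tgt)

def splitTarget (target : String) (w2 : String) : String × String :=
  let t := (PySem.Str.lower target).toList
  let w := (PySem.Str.lower w2).toList
  let st := splitTargetLoopA w ([], t)
  (String.ofList st.1, String.ofList st.2)

-- ===== PORT B =====
-- B's loop over target: j is the int search start into w2, i the matched-prefix length;
-- w2.find(t, j) is PySem.Chars.findFrom.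
def splitTargetLoopB (w : List Char) : List Char → Int → Nat → Nat
  | [], _, i => i
  | t :: rest, j, i =>
    let k := PySem.Chars.findFrom w [t] j none
    if k = -1 then i
    else splitTargetLoopB w rest (k + 1) (i + 1)

def splitTarget_alt (target : String) (w2 : String) : String × String :=
  let t := (PySem.Str.lower target).toList
  let w := (PySem.Str.lower w2).toList
  let i : Nat := splitTargetLoopB w t 0 0
  (String.ofList (PySem.List.slice t none (some (i : Int))),
   String.ofList (PySem.List.slice t (some (i : Int)) none))

-- ===== PRECONDITION & SPEC =====
def Spec_splitTarget (target : String) (w2 : String) (out : String × String) : Prop := out = splitTarget_alt target w2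
instance (target : String) (w2 : String) (out : String × String) : Decidable (Spec_splitTarget target w2 out) := by unfold Spec_splitTarget; infer_instance

-- ===== CLAIM (what is proved, stated in full; the proofs are below) =====
def Claim_equal_splitTarget : Prop := ∀ (target : String) (w2 : String), Dom_splitTarget target w2 → Spec_splitTarget target w2 (splitTarget target w2)

-- ===== LEMMAS AND PROOFS =====

-- helper: [a] is a prefix of v iff v's head is a
theorem singleton_prefix_iff (a : Char) (v : List Char) : [a] <+: v ↔ v.head? = some a := by
  cases v with
  | nil => simp
  | cons b t => simp [List.cons_prefix_cons, eq_comm]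

-- helper: [a] is an infix of u iff a ∈ u
theorem singleton_infix_iff (a : Char) (u : List Char) : [a] <:+: u ↔ a ∈ u := by
  constructor
  · rintro ⟨s, t, rfl⟩; simp
  · intro h
    obtain ⟨s, t, rfl⟩ := List.mem_iff_append.mp h
    exact ⟨s, t, by simp⟩

-- the matched-prefix length, computed A's way (recursion on w2)
def mCount : List Char → List Char → Nat
  | [], _ => 0
  | c :: cs, tgt =>
    if tgt.take 1 = [c] then 1 + mCount cs (tgt.drop 1)
    else mCount cs tgt

theorem slice_one_to (t : List Char) : PySem.List.slice t none (some 1) = t.take 1 := by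
  simp [pysem]

theorem slice_one_from (t : List Char) : PySem.List.slice t (some 1) none = t.drop 1 := by
  simp [pysem]

theorem loopA_eq_mCount (w : List Char) : ∀ (g t : List Char),
    splitTargetLoopA w (g, t) = (g ++ t.take (mCount w t), t.drop (mCount w t)) := by
  induction w with
  | nil => intro g t; simp [splitTargetLoopA, mCount]
  | cons c cs ih =>
    intro g t
    simp only [splitTargetLoopA, mCount, slice_one_to, slice_one_from]
    split_ifs with h
    · rw [ih]
      cases t with
      | nil => simp at h
      | cons a t' =>
        simp only [List.take_succ_cons, List.take_zero] at h
        obtain rfl : a = c := by injection h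
        simp [Nat.add_comm 1 (mCount cs t')]
    · exact ih g t

theorem mCount_nil_tgt (w : List Char) : mCount w [] = 0 := by
  induction w with
  | nil => rfl
  | cons c cs ih => simp [mCount, ih]

theorem mCount_not_mem {t : Char} {u : List Char} (h : t ∉ u) (rest : List Char) :
    mCount u (t :: rest) = 0 := by
  induction u with
  | nil => rfl
  | cons c cs ih =>
    simp only [mCount, List.take_succ_cons, List.take_zero]
    have hct : ¬ ([t] = [c]) := by
      intro he; exact h (by injection he with h'; simp [h'])
    rw [if_neg hct]
    exact ih (fun hm => h (List.mem_cons_of_mem _ hm))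

theorem mCount_skip {t : Char} {p : List Char} (h : t ∉ p) (v rest : List Char) :
    mCount (p ++ v) (t :: rest) = mCount v (t :: rest) := by
  induction p with
  | nil => rfl
  | cons c cs ih =>
    simp only [List.cons_append, mCount, List.take_succ_cons, List.take_zero]
    have hct : ¬ ([t] = [c]) := by
      intro he; exact h (by injection he with h'; simp [h'])
    rw [if_neg hct]
    exact ih (fun hm => h (List.mem_cons_of_mem _ hm))

-- B's loop computes i + mCount of the remaining w2-suffix
theorem loopB_eq_mCount (w : List Char) : ∀ (t : List Char) (jn i : Nat), jn ≤ w.length →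
    splitTargetLoopB w t (jn : Int) i = i + mCount (w.drop jn) t := by
  intro t
  induction t with
  | nil => intro jn i _; simp [splitTargetLoopB, mCount_nil_tgt]
  | cons a rest ih =>
    intro jn i hj
    set u := w.drop jn with hu
    simp only [splitTargetLoopB]
    rw [PySem.Chars.findFrom_natCast w [a] jn hj, ← hu]
    by_cases hf : PySem.Chars.find u [a] = -1
    · rw [if_pos hf, if_pos rfl]
      have hmem : a ∉ u := fun hm =>
        (PySem.Chars.find_eq_neg_one_iff u [a]).mp hf ((singleton_infix_iff a u).mpr hm)
      rw [mCount_not_mem hmem]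
      omega
    · have hnn : 0 ≤ PySem.Chars.find u [a] := by
        have := PySem.Chars.neg_one_le_find u [a]; omega
      rw [if_neg hf, if_neg (show ¬ ((jn : Int) + PySem.Chars.find u [a] = -1) by omega)]
      set f : Nat := (PySem.Chars.find u [a]).toNat with hfdef
      have hfind : PySem.Chars.find u [a] = (f : Int) := by omega
      obtain ⟨hpre, hmin⟩ := PySem.Chars.find_spec hnn
      have hhead : (u.drop f).head? = some a := (singleton_prefix_iff a _).mp hpre
      have hflen : f < u.length := by
        by_contra hle
        rw [List.drop_eq_nil_of_le (by omega)] at hhead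
        simp at hhead
      have hgetf : u[f] = a := by
        have := hhead
        rw [List.head?_drop, List.getElem?_eq_getElem hflen] at this
        injection this
      have hdecomp : u = u.take f ++ a :: u.drop (f + 1) := by
        have h1 : u.drop f = a :: u.drop (f + 1) := by
          rw [List.drop_eq_getElem_cons hflen, hgetf]
        calc u = u.take f ++ u.drop f := (List.take_append_drop f u).symm
          _ = u.take f ++ a :: u.drop (f + 1) := by rw [h1]
      have hnotin : a ∉ u.take f := by
        intro hm
        obtain ⟨i', hi', hei⟩ := List.getElem_of_mem hm
        have hlt : i' < f := lt_of_lt_of_le hi' (by simp)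
        have hil : i' < u.length := by omega
        have hia : u[i'] = a := by rw [← hei, List.getElem_take]
        exact hmin i' hlt (by
          rw [singleton_prefix_iff, List.head?_drop, List.getElem?_eq_getElem hil, hia])
      have hm1 : mCount u (a :: rest) = 1 + mCount (u.drop (f + 1)) rest := by
        conv_lhs => rw [hdecomp]
        rw [mCount_skip hnotin, mCount]
        simp
      have hcast : (jn : Int) + PySem.Chars.find u [a] + 1 = ((jn + f + 1 : Nat) : Int) := by
        rw [hfind]; push_cast; ring
      have hjle : jn + f + 1 ≤ w.length := by
        have hul : u.length = w.length - jn := by rw [hu, List.length_drop]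
        omega
      rw [hcast, ih (jn + f + 1) (i + 1) hjle]
      have hdd : w.drop (jn + f + 1) = u.drop (f + 1) := by
        rw [hu, List.drop_drop]; ring_nf
      rw [hdd, hm1]
      omega

-- ===== VERDICT (by name: the statement is the Claim_ definition above) =====
theorem splitTarget_spec : Claim_equal_splitTarget := by
  intro target w2 _
  unfold Spec_splitTarget splitTarget splitTarget_alt
  simp only []
  set t := (PySem.Str.lower target).toList
  set w := (PySem.Str.lower w2).toList
  have hB : splitTargetLoopB w t ((0 : Nat) : Int) 0 = 0 + mCount (w.drop 0) t :=
    loopB_eq_mCount w t 0 0 (Nat.zero_le _)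
  simp only [List.drop_zero, Nat.zero_add, Nat.cast_zero] at hB
  rw [loopA_eq_mCount, hB]
  simp [PySem.List.slice_to_natCast, PySem.List.slice_from_natCast]
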